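-- pv_equiv track=rewrite | github.com/lzxyzq/Cracking_the_Coding_Interview | Cracking_the_Code_Interview/Leetcode/Amazon_OA/Zombie in Matrix.py | minHour
-- ===== SOURCE A (Python) =====
-- def minHour(rows, columns, grid):
--     if not rows or not columns:
--         return 0
--
--     q = [[i,j] for i in range(rows) for j in range(columns) if grid[i][j]==1]
--     directions = [[1,0],[-1,0],[0,1],[0,-1]]
--     time = 0
--
--     while q:
--         new = []
--         for [i,j] in q:
--             for d in directions:
--                 ni,nj = i + d[0],j + d[1]
--                 if 0 <= ni < rows and 0 <= nj < columns and grid[ni][nj] == 0: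
--                     grid[ni][nj] = 1
--                     new.append([ni,nj])
--         q = new
--         if not q:
--             break
--         time += 1
--     return time
-- ===== SOURCE B (Python) =====
-- def minHour(rows, columns, grid):
--     # Round-based whole-grid relaxation (no BFS queue): each round flips every
--     # 0-cell that has a 1-neighbor, until a round flips nothing.
--     # Mutates grid in place exactly as A does.
--     if not rows or not columns:
--         return 0
--     time = 0
--     while True:
--         flips = [(i, j) for i in range(rows) for j in range(columns)
--                  if grid[i][j] == 0 and any(
--                      0 <= i + di < rows and 0 <= j + dj < columns and grid[i + di][j + dj] == 1
--                      for di, dj in ((1, 0), (-1, 0), (0, 1), (0, -1)))]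
--         if not flips:
--             return time
--         for i, j in flips:
--             grid[i][j] = 1
--         time += 1
-- ===== Notes on version B (the rewrite author's own statement) =====
-- stated objective: alternative
-- what changed: Replaces A's frontier-queue level BFS (building a `new` list of just-infected cells each wave) by a queue-free cellular-automaton relaxation: each round rescans the whole grid, flips every 0-cell that has a 1-neighbor, and counts rounds until a rescan flips nothing.
import Mathlib
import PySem

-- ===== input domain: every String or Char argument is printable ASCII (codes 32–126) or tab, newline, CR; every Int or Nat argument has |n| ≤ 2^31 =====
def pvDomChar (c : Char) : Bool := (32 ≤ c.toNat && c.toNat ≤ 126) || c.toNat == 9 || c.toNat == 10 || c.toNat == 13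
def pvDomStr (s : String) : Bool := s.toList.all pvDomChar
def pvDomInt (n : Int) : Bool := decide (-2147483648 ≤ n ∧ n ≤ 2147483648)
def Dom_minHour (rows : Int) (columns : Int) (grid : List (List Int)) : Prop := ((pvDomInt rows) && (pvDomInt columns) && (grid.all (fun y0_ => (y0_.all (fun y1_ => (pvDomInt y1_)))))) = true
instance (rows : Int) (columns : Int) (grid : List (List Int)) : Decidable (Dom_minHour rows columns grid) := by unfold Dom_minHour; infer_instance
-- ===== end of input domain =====

-- B replaces A's frontier-queue level BFS by a queue-free whole-grid relaxation (rounds of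
-- rescanning); same return value and same in-place grid mutation as A (proof is about the return value).

-- shared low-level indexing helpers (grid[i][j] read / write; exact under Pre_, where all accesses are in range)
def pvGet (g : List (List Int)) (i j : Int) : Int := (g.getD i.toNat []).getD j.toNat 0
def pvSet (g : List (List Int)) (i j : Int) (v : Int) : List (List Int) :=
  g.set i.toNat ((g.getD i.toNat []).set j.toNat v)
-- fuel: one productive loop iteration flips at least one 0-entry to 1, so #zeros+1 iterations always suffice
def pvFuel (g : List (List Int)) : Nat := (g.flatMap (fun r => r)).count 0 + 1

-- ===== PORT A =====
def pvDirs : List (Int × Int) := [(1,0),(-1,0),(0,1),(0,-1)]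

def pvWaveStep (rows columns : Int) (st : List (List Int) × List (Int × Int)) (c : Int × Int) :
    List (List Int) × List (Int × Int) :=
  pvDirs.foldl (fun st d =>
    let ni := c.1 + d.1
    let nj := c.2 + d.2
    if 0 ≤ ni ∧ ni < rows ∧ 0 ≤ nj ∧ nj < columns ∧ pvGet st.1 ni nj = 0 then
      (pvSet st.1 ni nj 1, st.2 ++ [(ni, nj)])
    else st) st

def pvLoopA (rows columns : Int) : Nat → List (List Int) → List (Int × Int) → Int → Int
  | 0, _, _, time => time
  | fuel + 1, g, q, time =>
    if q = [] then time
    else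
      let st := q.foldl (pvWaveStep rows columns) (g, [])
      if st.2 = [] then time else pvLoopA rows columns fuel st.1 st.2 (time + 1)

def minHour (rows : Int) (columns : Int) (grid : List (List Int)) : Int :=
  if rows = 0 ∨ columns = 0 then 0
  else
    let q := (PySem.List.pyRange 0 rows 1).flatMap (fun i =>
      ((PySem.List.pyRange 0 columns 1).filter (fun j => pvGet grid i j == 1)).map (fun j => (i, j)))
    pvLoopA rows columns (pvFuel grid) grid q 0

-- ===== PORT B =====
def pvNbrB (rows columns : Int) (g : List (List Int)) (ni nj : Int) : Bool :=
  decide (0 ≤ ni ∧ ni < rows ∧ 0 ≤ nj ∧ nj < columns ∧ pvGet g ni nj = 1)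

def pvScan (rows columns : Int) (g : List (List Int)) : List (Int × Int) :=
  (PySem.List.pyRange 0 rows 1).flatMap (fun i =>
    ((PySem.List.pyRange 0 columns 1).filter (fun j =>
      pvGet g i j == 0 &&
        (pvNbrB rows columns g (i+1) j || pvNbrB rows columns g (i-1) j ||
         pvNbrB rows columns g i (j+1) || pvNbrB rows columns g i (j-1)))).map (fun j => (i, j)))

def pvApply (g : List (List Int)) (L : List (Int × Int)) : List (List Int) :=
  L.foldl (fun g c => pvSet g c.1 c.2 1) g

def pvLoopB (rows columns : Int) : Nat → List (List Int) → Int → Int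
  | 0, _, time => time
  | fuel + 1, g, time =>
    let flips := pvScan rows columns g
    if flips = [] then time else pvLoopB rows columns fuel (pvApply g flips) (time + 1)

def minHour_alt (rows : Int) (columns : Int) (grid : List (List Int)) : Int :=
  if rows = 0 ∨ columns = 0 then 0
  else pvLoopB rows columns (pvFuel grid) grid 0

-- ===== PRECONDITION & SPEC =====
-- Pre_ excludes exactly the inputs where the Python A raises IndexError: rows > 0 and columns > 0
-- but the grid has fewer than rows rows, or some of its first rows rows has fewer than columns entries.
def Pre_minHour (rows : Int) (columns : Int) (grid : List (List Int)) : Prop :=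
  rows ≤ 0 ∨ columns ≤ 0 ∨
    (rows ≤ (grid.length : Int) ∧ ∀ r ∈ grid.take rows.toNat, columns ≤ (r.length : Int))
instance (rows : Int) (columns : Int) (grid : List (List Int)) : Decidable (Pre_minHour rows columns grid) := by
  unfold Pre_minHour; infer_instance

def pvWitness_minHour : Int × Int × List (List Int) := (2, 2, [[1,0],[0,0]])

def Spec_minHour (rows : Int) (columns : Int) (grid : List (List Int)) (out : Int) : Prop := out = minHour_alt rows columns grid
instance (rows : Int) (columns : Int) (grid : List (List Int)) (out : Int) : Decidable (Spec_minHour rows columns grid out) := by unfold Spec_minHour; infer_instance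

-- ===== CLAIM (what is proved, stated in full; the proofs are below) =====
def Claim_equal_minHour : Prop := ∀ (rows : Int) (columns : Int) (grid : List (List Int)), Dom_minHour rows columns grid → Pre_minHour rows columns grid → Spec_minHour rows columns grid (minHour rows columns grid)

-- ===== LEMMAS AND PROOFS =====

-- in-range coordinates
def InR (rows columns : Int) (c : Int × Int) : Prop :=
  0 ≤ c.1 ∧ c.1 < rows ∧ 0 ≤ c.2 ∧ c.2 < columns

-- grid is big enough for the scanned region
def Dims (rows columns : Int) (g : List (List Int)) : Prop :=
  rows.toNat ≤ g.length ∧ ∀ a : Nat, a < rows.toNat → columns.toNat ≤ (g.getD a []).length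

-- c is a grid-neighbour of some cell of q
def Adj (q : List (Int × Int)) (c : Int × Int) : Prop :=
  ∃ p ∈ q, ∃ d ∈ pvDirs, (p.1 + d.1, p.2 + d.2) = c

-- the cells B's scan flips: in-range 0-cells with an in-range 1-neighbour
def Good (rows columns : Int) (g : List (List Int)) (c : Int × Int) : Prop :=
  InR rows columns c ∧ pvGet g c.1 c.2 = 0 ∧
    ∃ d ∈ pvDirs, InR rows columns (c.1 + d.1, c.2 + d.2) ∧ pvGet g (c.1 + d.1) (c.2 + d.2) = 1

-- A's loop invariant: q-cells are in-range 1-cells, and every Good cell is adjacent to q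
def InvQ (rows columns : Int) (g : List (List Int)) (q : List (Int × Int)) : Prop :=
  (∀ c ∈ q, InR rows columns c ∧ pvGet g c.1 c.2 = 1) ∧
  (∀ c, Good rows columns g c → Adj q c)


-- low-level get/set facts
theorem pvSet_length (g : List (List Int)) (i j v : Int) : (pvSet g i j v).length = g.length := by
  simp [pvSet]

theorem pvSet_rowlen (g : List (List Int)) (i j v : Int) (a : Nat) :
    ((pvSet g i j v).getD a []).length = (g.getD a []).length := by
  simp only [pvSet, List.getD_eq_getElem?_getD, List.getElem?_set]
  by_cases h : i.toNat = a
  · subst h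
    by_cases hb : i.toNat < g.length
    · simp [hb, List.getD_eq_getElem?_getD, List.getElem?_eq_getElem hb]
    · simp [hb, List.getElem?_eq_none (by omega : g.length ≤ i.toNat)]
  · simp [h]

theorem pvGet_pvSet_same (g : List (List Int)) {i j : Int} (v : Int)
    (hbi : i.toNat < g.length) (hbj : j.toNat < (g.getD i.toNat []).length) :
    pvGet (pvSet g i j v) i j = v := by
  simp only [pvGet, pvSet, List.getD_eq_getElem?_getD, List.getElem?_set]
  simp [hbi, List.getD_eq_getElem?_getD,
    (by simpa [List.getD_eq_getElem?_getD, List.getElem?_eq_getElem hbi] using hbj :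
      j.toNat < (g[i.toNat]).length)]

theorem pvGet_pvSet_ne (g : List (List Int)) {i j i' j' : Int} (v : Int)
    (hi : 0 ≤ i) (hj : 0 ≤ j) (hi' : 0 ≤ i') (hj' : 0 ≤ j')
    (h : ¬(i' = i ∧ j' = j)) :
    pvGet (pvSet g i j v) i' j' = pvGet g i' j' := by
  by_cases hii : i.toNat = i'.toNat
  · have hieq : i' = i := by omega
    have hjne : j' ≠ j := fun hj2 => h ⟨hieq, hj2⟩
    have hjj : j.toNat ≠ j'.toNat := by omega
    by_cases hb : i'.toNat < g.length
    · have hset : (pvSet g i j v).getD i'.toNat [] = (g.getD i.toNat []).set j.toNat v := by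
        rw [← hii, pvSet, List.getD_eq_getElem?_getD, List.getElem?_set_self (by omega)]
        rfl
      rw [pvGet, hset, pvGet, List.getD_eq_getElem?_getD, List.getElem?_set_ne hjj,
        ← List.getD_eq_getElem?_getD, hii]
    · have h1 : (pvSet g i j v).getD i'.toNat [] = [] := by
        rw [pvSet, List.getD_eq_getElem?_getD,
          List.getElem?_eq_none (by simpa [List.length_set] using (by omega : g.length ≤ i'.toNat))]
        rfl
      have h2 : g.getD i'.toNat [] = [] := by
        rw [List.getD_eq_getElem?_getD, List.getElem?_eq_none (by omega : g.length ≤ i'.toNat)]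
        rfl
      simp only [pvGet]; rw [h1, h2]
  · have hrow : (pvSet g i j v).getD i'.toNat [] = g.getD i'.toNat [] := by
      rw [pvSet, List.getD_eq_getElem?_getD, List.getElem?_set_ne hii, ← List.getD_eq_getElem?_getD]
    rw [pvGet, hrow, pvGet]

-- one direction of A's inner loop, as a named step
def dstep (rows columns : Int) (st : List (List Int) × List (Int × Int)) (t : Int × Int) :
    List (List Int) × List (Int × Int) :=
  if 0 ≤ t.1 ∧ t.1 < rows ∧ 0 ≤ t.2 ∧ t.2 < columns ∧ pvGet st.1 t.1 t.2 = 0 then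
    (pvSet st.1 t.1 t.2 1, st.2 ++ [t])
  else st

theorem pvWaveStep_eq (rows columns : Int) (st : List (List Int) × List (Int × Int)) (c : Int × Int) :
    pvWaveStep rows columns st c =
      dstep rows columns (dstep rows columns (dstep rows columns (dstep rows columns st
        (c.1 + 1, c.2 + 0)) (c.1 + -1, c.2 + 0)) (c.1 + 0, c.2 + 1)) (c.1 + 0, c.2 + -1) := by
  rfl

-- invariant of A's wave fold: S is the set of targets offered so far
def WInv (rows columns : Int) (g : List (List Int)) (S : Int × Int → Prop)
    (st : List (List Int) × List (Int × Int)) : Prop :=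
  st.1.length = g.length ∧
  (∀ a : Nat, (st.1.getD a []).length = (g.getD a []).length) ∧
  (∀ i j : Int, 0 ≤ i → 0 ≤ j →
      ((InR rows columns (i, j) ∧ pvGet g i j = 0 ∧ S (i, j)) → pvGet st.1 i j = 1) ∧
      (¬(InR rows columns (i, j) ∧ pvGet g i j = 0 ∧ S (i, j)) → pvGet st.1 i j = pvGet g i j)) ∧
  (∀ c, c ∈ st.2 ↔ (InR rows columns c ∧ pvGet g c.1 c.2 = 0 ∧ S c))

theorem WInv_congr {rows columns : Int} {g : List (List Int)} {S S' : Int × Int → Prop}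
    {st : List (List Int) × List (Int × Int)} (hS : ∀ c, S c ↔ S' c)
    (h : WInv rows columns g S st) : WInv rows columns g S' st := by
  have : S = S' := funext fun c => propext (hS c)
  rw [← this]; exact h

theorem dstep_inv {rows columns : Int} {g : List (List Int)} {S : Int × Int → Prop}
    {st : List (List Int) × List (Int × Int)} {t : Int × Int}
    (hD : Dims rows columns g) (h : WInv rows columns g S st) :
    WInv rows columns g (fun c => S c ∨ c = t) (dstep rows columns st t) := by
  obtain ⟨t1, t2⟩ := t
  obtain ⟨h1, h2, h3, h4⟩ := h
  show WInv rows columns g _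
    (if 0 ≤ t1 ∧ t1 < rows ∧ 0 ≤ t2 ∧ t2 < columns ∧ pvGet st.1 t1 t2 = 0 then
      (pvSet st.1 t1 t2 1, st.2 ++ [(t1, t2)]) else st)
  by_cases hc : 0 ≤ t1 ∧ t1 < rows ∧ 0 ≤ t2 ∧ t2 < columns ∧ pvGet st.1 t1 t2 = 0
  · rw [if_pos hc]
    obtain ⟨ht1, ht2, ht3, ht4, ht0⟩ := hc
    have hInRt : InR rows columns (t1, t2) := ⟨ht1, ht2, ht3, ht4⟩
    have hnc : ¬(InR rows columns (t1, t2) ∧ pvGet g t1 t2 = 0 ∧ S (t1, t2)) := by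
      intro hcc
      have := (h3 t1 t2 ht1 ht3).1 hcc
      omega
    have hg0 : pvGet g t1 t2 = 0 := by
      have := (h3 t1 t2 ht1 ht3).2 hnc
      omega
    have hb1 : t1.toNat < st.1.length := by
      have := hD.1
      rw [h1]
      omega
    have hb2 : t2.toNat < (st.1.getD t1.toNat []).length := by
      have := hD.2 t1.toNat (by omega)
      rw [h2]
      omega
    refine ⟨by simpa [pvSet_length] using h1, fun a => by rw [pvSet_rowlen]; exact h2 a, ?_, ?_⟩
    · intro i j hi hj
      by_cases he : (i, j) = (t1, t2)
      · obtain ⟨hi1, hj1⟩ := Prod.mk.injEq .. ▸ he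
        subst hi1; subst hj1
        constructor
        · intro _
          exact pvGet_pvSet_same st.1 1 hb1 hb2
        · intro hn
          exact absurd ⟨hInRt, hg0, Or.inr rfl⟩ hn
      · have hne : pvGet (pvSet st.1 t1 t2 1) i j = pvGet st.1 i j :=
          pvGet_pvSet_ne st.1 1 ht1 ht3 hi hj
            (fun ⟨a, b⟩ => he (by rw [a, b]))
        constructor
        · rintro ⟨hIn, hg, (hS | hS)⟩
          · rw [hne]; exact (h3 i j hi hj).1 ⟨hIn, hg, hS⟩
          · exact absurd hS he
        · intro hn
          rw [hne]
          exact (h3 i j hi hj).2 (fun ⟨a, b, c⟩ => hn ⟨a, b, Or.inl c⟩)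
    · intro c
      simp only [List.mem_append, List.mem_singleton]
      rw [h4 c]
      constructor
      · rintro (⟨a, b, c'⟩ | rfl)
        · exact ⟨a, b, Or.inl c'⟩
        · exact ⟨hInRt, hg0, Or.inr rfl⟩
      · rintro ⟨a, b, (c' | rfl)⟩
        · exact Or.inl ⟨a, b, c'⟩
        · exact Or.inr rfl
  · rw [if_neg hc]
    refine ⟨h1, h2, ?_, ?_⟩
    · intro i j hi hj
      by_cases he : (i, j) = (t1, t2)
      · obtain ⟨hi1, hj1⟩ := Prod.mk.injEq .. ▸ he
        subst hi1; subst hj1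
        constructor
        · rintro ⟨hIn, hg0, -⟩
          have hne0 : pvGet st.1 i j ≠ 0 := by
            intro h0
            exact hc ⟨hIn.1, hIn.2.1, hIn.2.2.1, hIn.2.2.2, h0⟩
          by_cases hS : S (i, j)
          · exact (h3 i j hi hj).1 ⟨hIn, hg0, hS⟩
          · exfalso
            apply hne0
            rw [(h3 i j hi hj).2 (fun ⟨a, b, c⟩ => hS c)]
            exact hg0
        · intro hn
          exact (h3 i j hi hj).2 (fun ⟨a, b, c⟩ => hn ⟨a, b, Or.inl c⟩)
      · constructor
        · rintro ⟨a, b, (c' | hc2)⟩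
          · exact (h3 i j hi hj).1 ⟨a, b, c'⟩
          · exact absurd hc2 he
        · intro hn
          exact (h3 i j hi hj).2 (fun ⟨a, b, c⟩ => hn ⟨a, b, Or.inl c⟩)
    · intro c
      rw [h4 c]
      constructor
      · rintro ⟨a, b, c'⟩
        exact ⟨a, b, Or.inl c'⟩
      · rintro ⟨a, b, (c' | rfl)⟩
        · exact ⟨a, b, c'⟩
        · have hne0 : pvGet st.1 t1 t2 ≠ 0 := by
            intro h0
            exact hc ⟨a.1, a.2.1, a.2.2.1, a.2.2.2, h0⟩
          by_cases hS : S (t1, t2)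
          · exact ⟨a, b, hS⟩
          · exfalso
            apply hne0
            rw [(h3 t1 t2 a.1 a.2.2.1).2 (fun ⟨x, y, z⟩ => hS z)]
            exact b

theorem wave_inv {rows columns : Int} {g : List (List Int)} (hD : Dims rows columns g) :
    ∀ (q : List (Int × Int)) (S : Int × Int → Prop) (st : List (List Int) × List (Int × Int)),
      WInv rows columns g S st →
      WInv rows columns g (fun c => S c ∨ Adj q c) (q.foldl (pvWaveStep rows columns) st) := by
  intro q
  induction q with
  | nil =>
    intro S st h
    exact WInv_congr (fun c => by simp [Adj]) h
  | cons p q ih =>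
    intro S st h
    rw [List.foldl_cons]
    have hw := dstep_inv (t := (p.1 + 0, p.2 + -1)) hD (dstep_inv (t := (p.1 + 0, p.2 + 1)) hD
      (dstep_inv (t := (p.1 + -1, p.2 + 0)) hD (dstep_inv (t := (p.1 + 1, p.2 + 0)) hD h)))
    rw [← pvWaveStep_eq rows columns st p] at hw
    have hfin := ih _ _ hw
    refine WInv_congr (fun c => ?_) hfin
    have hadj : Adj (p :: q) c ↔
        (c = (p.1 + 1, p.2 + 0) ∨ c = (p.1 + -1, p.2 + 0) ∨
         c = (p.1 + 0, p.2 + 1) ∨ c = (p.1 + 0, p.2 + -1)) ∨ Adj q c := by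
      simp only [Adj, List.mem_cons, pvDirs]
      constructor
      · rintro ⟨p', (rfl | hp'), hd⟩
        · simp only [List.mem_cons, List.not_mem_nil, or_false] at hd
          rcases hd with ⟨d, (rfl | rfl | rfl | rfl), hde⟩ <;>
            exact Or.inl (by rw [← hde]; tauto)
        · exact Or.inr ⟨p', hp', hd⟩
      · rintro (h4 | ⟨p', hp', hd⟩)
        · refine ⟨p, Or.inl rfl, ?_⟩
          rcases h4 with rfl | rfl | rfl | rfl
          · exact ⟨(1, 0), by simp, rfl⟩
          · exact ⟨(-1, 0), by simp, rfl⟩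
          · exact ⟨(0, 1), by simp, rfl⟩
          · exact ⟨(0, -1), by simp, rfl⟩
        · exact ⟨p', Or.inr hp', hd⟩
    rw [hadj]
    tauto

theorem wave_winv {rows columns : Int} {g : List (List Int)} (hD : Dims rows columns g)
    (q : List (Int × Int)) :
    WInv rows columns g (Adj q) (q.foldl (pvWaveStep rows columns) (g, [])) := by
  have h0 : WInv rows columns g (fun _ => False) (g, []) :=
    ⟨rfl, fun a => rfl, fun i j hi hj => ⟨fun h => h.2.2.elim, fun _ => rfl⟩, fun c => by simp⟩
  exact WInv_congr (fun c => by tauto) (wave_inv hD q _ _ h0)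

theorem neg_dir {d : Int × Int} (hd : d ∈ pvDirs) :
    ∃ d' ∈ pvDirs, d'.1 = -d.1 ∧ d'.2 = -d.2 := by
  simp only [pvDirs, List.mem_cons, List.not_mem_nil, or_false] at hd
  rcases hd with rfl | rfl | rfl | rfl
  · exact ⟨(-1, 0), by simp [pvDirs], by norm_num⟩
  · exact ⟨(1, 0), by simp [pvDirs], by norm_num⟩
  · exact ⟨(0, -1), by simp [pvDirs], by norm_num⟩
  · exact ⟨(0, 1), by simp [pvDirs], by norm_num⟩

theorem mem_scan {rows columns : Int} {g : List (List Int)} {c : Int × Int} :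
    c ∈ pvScan rows columns g ↔ Good rows columns g c := by
  obtain ⟨c1, c2⟩ := c
  simp only [pvScan, List.mem_flatMap, List.mem_map, List.mem_filter,
    PySem.List.mem_pyRange_one, Bool.and_eq_true, Bool.or_eq_true, beq_iff_eq,
    pvNbrB, decide_eq_true_eq, Prod.mk.injEq]
  constructor
  · rintro ⟨i, ⟨hi0, hir⟩, j, ⟨⟨hj0, hjr⟩, hg0, hnb⟩, rfl, rfl⟩
    refine ⟨⟨hi0, hir, hj0, hjr⟩, hg0, ?_⟩
    rcases hnb with ((⟨a, b, cc, d, e⟩ | ⟨a, b, cc, d, e⟩) | ⟨a, b, cc, d, e⟩) | ⟨a, b, cc, d, e⟩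
    · exact ⟨(1, 0), by simp [pvDirs], by simp [InR]; omega, by simpa using e⟩
    · exact ⟨(-1, 0), by simp [pvDirs], by simp [InR]; omega, by simpa using e⟩
    · exact ⟨(0, 1), by simp [pvDirs], by simp [InR]; omega, by simpa using e⟩
    · exact ⟨(0, -1), by simp [pvDirs], by simp [InR]; omega, by simpa using e⟩
  · rintro ⟨⟨hi0, hir, hj0, hjr⟩, hg0, d, hd, hIn, he⟩
    refine ⟨c1, ⟨hi0, hir⟩, c2, ⟨⟨hj0, hjr⟩, hg0, ?_⟩, rfl, rfl⟩
    simp only [pvDirs, List.mem_cons, List.not_mem_nil, or_false] at hd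
    simp only [InR] at hIn
    rcases hd with rfl | rfl | rfl | rfl
    · simp at hIn
      exact Or.inl (Or.inl (Or.inl ⟨by omega, by omega, by omega, by omega, by simpa using he⟩))
    · simp at hIn
      exact Or.inl (Or.inl (Or.inr ⟨by omega, by omega, by omega, by omega, by simpa using he⟩))
    · simp at hIn
      exact Or.inl (Or.inr ⟨by omega, by omega, by omega, by omega, by simpa using he⟩)
    · simp at hIn
      exact Or.inr ⟨by omega, by omega, by omega, by omega, by simpa using he⟩

theorem mem_q0 {rows columns : Int} {g : List (List Int)} {c : Int × Int} :
    c ∈ (PySem.List.pyRange 0 rows 1).flatMap (fun i =>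
      ((PySem.List.pyRange 0 columns 1).filter (fun j => pvGet g i j == 1)).map (fun j => (i, j))) ↔
      InR rows columns c ∧ pvGet g c.1 c.2 = 1 := by
  obtain ⟨c1, c2⟩ := c
  simp only [List.mem_flatMap, List.mem_map, List.mem_filter, PySem.List.mem_pyRange_one,
    beq_iff_eq, Prod.mk.injEq]
  constructor
  · rintro ⟨i, ⟨hi0, hir⟩, j, ⟨⟨hj0, hjr⟩, hg1⟩, rfl, rfl⟩
    exact ⟨⟨hi0, hir, hj0, hjr⟩, hg1⟩
  · rintro ⟨⟨hi0, hir, hj0, hjr⟩, hg1⟩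
    exact ⟨c1, ⟨hi0, hir⟩, c2, ⟨⟨hj0, hjr⟩, hg1⟩, rfl, rfl⟩

theorem pvApply_length (g : List (List Int)) (L : List (Int × Int)) :
    (pvApply g L).length = g.length := by
  induction L generalizing g with
  | nil => rfl
  | cons c L ih =>
    show (pvApply (pvSet g c.1 c.2 1) L).length = g.length
    rw [ih, pvSet_length]

theorem pvApply_rowlen (g : List (List Int)) (L : List (Int × Int)) (a : Nat) :
    ((pvApply g L).getD a []).length = (g.getD a []).length := by
  induction L generalizing g with
  | nil => rfl
  | cons c L ih =>
    show ((pvApply (pvSet g c.1 c.2 1) L).getD a []).length = (g.getD a []).length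
    rw [ih, pvSet_rowlen]

theorem pvGet_pvApply {rows columns : Int} (L : List (Int × Int))
    (hL : ∀ c ∈ L, InR rows columns c) :
    ∀ (g' : List (List Int)), Dims rows columns g' →
      ∀ i j : Int, 0 ≤ i → 0 ≤ j →
        pvGet (pvApply g' L) i j = if (i, j) ∈ L then 1 else pvGet g' i j := by
  revert hL
  induction L with
  | nil =>
    intro hL g' hD' i j hi hj
    simp [pvApply]
  | cons c L ih =>
    intro hL g' hD' i j hi hj
    have hLt : ∀ x ∈ L, InR rows columns x := fun x hx => hL x (List.mem_cons_of_mem _ hx)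
    have hcIn : InR rows columns c := hL c List.mem_cons_self
    have hD2 : Dims rows columns (pvSet g' c.1 c.2 1) :=
      ⟨by rw [pvSet_length]; exact hD'.1, fun a ha => by rw [pvSet_rowlen]; exact hD'.2 a ha⟩
    have hstep : pvGet (pvApply (pvSet g' c.1 c.2 1) L) i j =
        if (i, j) ∈ L then 1 else pvGet (pvSet g' c.1 c.2 1) i j :=
      ih hLt (pvSet g' c.1 c.2 1) hD2 i j hi hj
    show pvGet (pvApply (pvSet g' c.1 c.2 1) L) i j = _
    rw [hstep]
    by_cases h1 : (i, j) ∈ L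
    · simp [h1, List.mem_cons]
    · by_cases h2 : (i, j) = c
      · have hb1 : c.1.toNat < g'.length := by
          have := hD'.1
          have := hcIn.1
          have := hcIn.2.1
          omega
        have hb2 : c.2.toNat < (g'.getD c.1.toNat []).length := by
          have := hD'.2 c.1.toNat (by have := hcIn.1; have := hcIn.2.1; omega)
          have := hcIn.2.2.1
          have := hcIn.2.2.2
          omega
        have hi1 : i = c.1 := by rw [← h2]
        have hj1 : j = c.2 := by rw [← h2]
        subst hi1; subst hj1
        rw [if_neg h1, pvGet_pvSet_same g' 1 hb1 hb2, if_pos (List.mem_cons_self)]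
      · have hne : pvGet (pvSet g' c.1 c.2 1) i j = pvGet g' i j :=
          pvGet_pvSet_ne g' 1 hcIn.1 hcIn.2.2.1 hi hj
            (fun ⟨a, b⟩ => h2 (by rw [a, b]))
        rw [if_neg h1, hne, if_neg (by simp [List.mem_cons]; tauto)]

theorem grid_ext {g1 g2 : List (List Int)} (h1 : g1.length = g2.length)
    (h2 : ∀ a : Nat, (g1.getD a []).length = (g2.getD a []).length)
    (h3 : ∀ a b : Nat, (g1.getD a []).getD b 0 = (g2.getD a []).getD b 0) : g1 = g2 := by
  refine List.ext_getElem h1 fun a ha1 ha2 => ?_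
  refine List.ext_getElem ?_ fun b hb1 hb2 => ?_
  · have := h2 a
    rwa [List.getD_eq_getElem _ _ ha1, List.getD_eq_getElem _ _ ha2] at this
  · have := h3 a b
    rwa [List.getD_eq_getElem _ _ ha1, List.getD_eq_getElem _ _ ha2,
      List.getD_eq_getElem _ _ hb1, List.getD_eq_getElem _ _ hb2] at this

theorem flip_iff_good {rows columns : Int} {g : List (List Int)} {q : List (Int × Int)}
    (hq : InvQ rows columns g q) (c : Int × Int) :
    (InR rows columns c ∧ pvGet g c.1 c.2 = 0 ∧ Adj q c) ↔ Good rows columns g c := by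
  obtain ⟨cx, cy⟩ := c
  constructor
  · rintro ⟨hIn, hg0, p, hp, d, hd, he⟩
    obtain ⟨hpIn, hp1⟩ := hq.1 p hp
    obtain ⟨d', hd', e1, e2⟩ := neg_dir hd
    have hex : p.1 + d.1 = cx := by
      have := congrArg Prod.fst he
      simpa using this
    have hey : p.2 + d.2 = cy := by
      have := congrArg Prod.snd he
      simpa using this
    have hpe : (cx + d'.1, cy + d'.2) = p := by
      rw [Prod.mk.injEq]
      constructor <;> [skip; skip] <;> omega
    refine ⟨hIn, hg0, d', hd', ?_, ?_⟩
    · rw [hpe]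
      exact hpIn
    · show pvGet g (cx + d'.1) (cy + d'.2) = 1
      have h1 : cx + d'.1 = p.1 := by omega
      have h2 : cy + d'.2 = p.2 := by omega
      rw [h1, h2]
      exact hp1
  · intro hGood
    exact ⟨hGood.1, hGood.2.1, hq.2 _ hGood⟩

theorem loops_eq (rows columns : Int) :
    ∀ (fuel : Nat) (g : List (List Int)) (q : List (Int × Int)) (time : Int),
      Dims rows columns g → InvQ rows columns g q →
      pvLoopA rows columns fuel g q time = pvLoopB rows columns fuel g time := by
  intro fuel
  induction fuel with
  | zero => intro g q time hD hq; rfl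
  | succ fuel ih =>
    intro g q time hD hq
    rw [pvLoopA, pvLoopB]
    by_cases hqe : q = []
    · have hs : pvScan rows columns g = [] := by
        rw [List.eq_nil_iff_forall_not_mem]
        intro c hc
        obtain ⟨p, hp, -⟩ := hq.2 c (mem_scan.mp hc)
        rw [hqe] at hp
        simp at hp
      simp [hqe, hs]
    · rw [if_neg hqe]
      obtain ⟨w1, w2, w3, w4⟩ := wave_winv hD q
      have hmem : ∀ c, c ∈ (q.foldl (pvWaveStep rows columns) (g, [])).2 ↔
          Good rows columns g c := by
        intro c
        rw [w4 c]
        exact flip_iff_good hq c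
      have hscan : ∀ c, c ∈ pvScan rows columns g ↔
          c ∈ (q.foldl (pvWaveStep rows columns) (g, [])).2 := by
        intro c
        rw [mem_scan, hmem]
      by_cases he : (q.foldl (pvWaveStep rows columns) (g, [])).2 = []
      · have hs : pvScan rows columns g = [] := by
          rw [List.eq_nil_iff_forall_not_mem]
          intro c hc
          have := (hscan c).mp hc
          rw [he] at this
          simp at this
        simp [he, hs]
      · have hsne : pvScan rows columns g ≠ [] := by
          intro h0
          apply he
          rw [List.eq_nil_iff_forall_not_mem]
          intro c hc
          have := (hscan c).mpr hc
          rw [h0] at this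
          simp at this
        rw [if_neg he, if_neg hsne]
        have hDg' : Dims rows columns (q.foldl (pvWaveStep rows columns) (g, [])).1 :=
          ⟨by rw [w1]; exact hD.1, fun a ha => by rw [w2 a]; exact hD.2 a ha⟩
        have hInv' : InvQ rows columns (q.foldl (pvWaveStep rows columns) (g, [])).1
            (q.foldl (pvWaveStep rows columns) (g, [])).2 := by
          constructor
          · intro c hc
            have hGc := (hmem c).mp hc
            exact ⟨hGc.1, (w3 c.1 c.2 hGc.1.1 hGc.1.2.2.1).1 ((w4 c).mp hc)⟩
          · rintro ⟨cx, cy⟩ ⟨hIn, h0, d, hd, hInN, h1n⟩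
            dsimp only at hIn h0 hInN h1n
            have hnc : ¬(InR rows columns (cx, cy) ∧ pvGet g cx cy = 0 ∧ Adj q (cx, cy)) := by
              intro hcc
              have := (w3 cx cy hIn.1 hIn.2.2.1).1 hcc
              omega
            have hval : pvGet (q.foldl (pvWaveStep rows columns) (g, [])).1 cx cy =
                pvGet g cx cy := (w3 cx cy hIn.1 hIn.2.2.1).2 hnc
            have hg0 : pvGet g cx cy = 0 := by omega
            by_cases hGn : Good rows columns g (cx + d.1, cy + d.2)
            · obtain ⟨d', hd', e1, e2⟩ := neg_dir hd
              refine ⟨(cx + d.1, cy + d.2), (hmem _).mpr hGn, d', hd', ?_⟩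
              rw [Prod.mk.injEq]
              constructor <;> [skip; skip] <;> simp <;> omega
            · exfalso
              have hInN' : 0 ≤ cx + d.1 ∧ 0 ≤ cy + d.2 := ⟨hInN.1, hInN.2.2.1⟩
              have hvn : pvGet (q.foldl (pvWaveStep rows columns) (g, [])).1 (cx + d.1) (cy + d.2) =
                  pvGet g (cx + d.1) (cy + d.2) :=
                (w3 (cx + d.1) (cy + d.2) hInN'.1 hInN'.2).2
                  (fun hcc => hGn ((flip_iff_good hq _).mp hcc))
              have hn1 : pvGet g (cx + d.1) (cy + d.2) = 1 := by
                rw [← hvn]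
                exact h1n
              have hGc : Good rows columns g (cx, cy) := ⟨hIn, hg0, d, hd, hInN, hn1⟩
              exact hnc ⟨hIn, hg0, hq.2 _ hGc⟩
        have hGapply : (q.foldl (pvWaveStep rows columns) (g, [])).1 =
            pvApply g (pvScan rows columns g) := by
          apply grid_ext
          · rw [w1, pvApply_length]
          · intro a
            rw [w2 a, pvApply_rowlen]
          · intro a b
            have hA := w3 (a : Int) (b : Int) (Int.natCast_nonneg a) (Int.natCast_nonneg b)
            have hB := pvGet_pvApply (pvScan rows columns g)
              (fun c hc => (mem_scan.mp hc).1) g hD (a : Int) (b : Int)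
              (Int.natCast_nonneg a) (Int.natCast_nonneg b)
            show pvGet (q.foldl (pvWaveStep rows columns) (g, [])).1 (a : Int) (b : Int) =
              pvGet (pvApply g (pvScan rows columns g)) (a : Int) (b : Int)
            by_cases hGab : Good rows columns g ((a : Int), (b : Int))
            · rw [hA.1 ((flip_iff_good hq _).mpr hGab), hB,
                if_pos (mem_scan.mpr hGab)]
            · rw [hA.2 (fun hcc => hGab ((flip_iff_good hq _).mp hcc)), hB,
                if_neg (fun hmem2 => hGab (mem_scan.mp hmem2))]
        rw [ih _ _ (time + 1) hDg' hInv', hGapply]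

-- ===== VERDICT (by name: the statement is the Claim_ definition above) =====
theorem minHour_spec : Claim_equal_minHour := by
  intro rows columns grid _ hpre
  unfold Spec_minHour minHour minHour_alt
  by_cases hz : rows = 0 ∨ columns = 0
  · rw [if_pos hz, if_pos hz]
  · rw [if_neg hz, if_neg hz]
    by_cases hneg : rows ≤ 0 ∨ columns ≤ 0
    · have hq0 : (PySem.List.pyRange 0 rows 1).flatMap (fun i =>
          ((PySem.List.pyRange 0 columns 1).filter (fun j => pvGet grid i j == 1)).map
            (fun j => (i, j))) = [] := by
        rw [List.eq_nil_iff_forall_not_mem]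
        intro c hc
        obtain ⟨⟨a, b, c', d⟩, -⟩ := mem_q0.mp hc
        rcases hneg with h | h <;> omega
      have hs : pvScan rows columns grid = [] := by
        rw [List.eq_nil_iff_forall_not_mem]
        intro c hc
        obtain ⟨⟨a, b, c', d⟩, -⟩ := (mem_scan.mp hc : Good rows columns grid c)
        rcases hneg with h | h <;> omega
      rw [hq0, pvFuel]
      rw [pvLoopA, pvLoopB, if_pos rfl, hs, if_pos rfl]
    · push Not at hneg
      have hD : Dims rows columns grid := by
        rcases hpre with h | h | ⟨h1, h2⟩
      -- first two disjuncts contradict 0 < rows, 0 < columns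
        · omega
        · omega
        · refine ⟨by omega, fun a ha => ?_⟩
          have halen : a < grid.length := by omega
          have hmem : grid.getD a [] ∈ grid.take rows.toNat := by
            rw [List.getD_eq_getElem _ _ halen]
            have hlt : a < (grid.take rows.toNat).length := by simp; omega
            have heq : (grid.take rows.toNat)[a] = grid[a] := List.getElem_take
            rw [← heq]
            exact List.getElem_mem hlt
          have := h2 _ hmem
          omega
      have hq : InvQ rows columns grid ((PySem.List.pyRange 0 rows 1).flatMap (fun i =>
          ((PySem.List.pyRange 0 columns 1).filter (fun j => pvGet grid i j == 1)).map
            (fun j => (i, j)))) := by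
        constructor
        · intro c hc
          exact mem_q0.mp hc
        · rintro ⟨cx, cy⟩ ⟨hIn, h0, d, hd, hInN, h1⟩
          obtain ⟨d', hd', e1, e2⟩ := neg_dir hd
          refine ⟨(cx + d.1, cy + d.2), mem_q0.mpr ⟨hInN, h1⟩, d', hd', ?_⟩
          rw [Prod.mk.injEq]
          constructor <;> simp <;> omega
      exact loops_eq rows columns (pvFuel grid) grid _ 0 hD hq
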